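-- pv_equiv track=rewrite | github.com/HAAIL-Universe/Little_Chef | app/services/inventory_agent.py | _split_segment_on_uncertainty
-- ===== SOURCE A (Python) =====
-- from typing import Dict, List, Match, Optional, Set, Tuple
--
-- UNCERTAINTY_MARKERS = {"not sure", "maybe", "how much", "no idea"}
--
-- def _split_segment_on_uncertainty(segment: str) -> List[str]:
--     lower = segment.lower()
--     earliest: Optional[int] = None
--     matched_marker: Optional[str] = None
--     for marker in UNCERTAINTY_MARKERS:
--         idx = lower.find(marker)
--         if idx != -1 and (earliest is None or idx < earliest):
--             earliest = idx
--             matched_marker = marker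
--     if earliest is None:
--         return [segment.strip()]
--     before = segment[:earliest].strip(" ,;.")
--     after = segment[earliest:].strip(" ,;. ")
--     # Strip the matched marker (and trailing filler like 'how much/many')
--     # from the 'after' portion so the item name survives.
--     if after and matched_marker:
--         after_lower = after.lower()
--         if after_lower.startswith(matched_marker):
--             after = after[len(matched_marker):].strip(" ,;.")
--             after_lower = after.lower()
--             for filler in ("how much", "how many"):
--                 if after_lower.startswith(filler):
--                     after = after[len(filler):].strip(" ,;.")
--                     break
--     results: List[str] = []
--     if before:
--         results.append(before)
--     if after:
--         results.append(after)
--     return results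
-- ===== SOURCE B (Python) =====
-- _MARKERS = ("not sure", "maybe", "how much", "no idea")
--
--
-- def _find_marker(lower):
--     # single left-to-right scan: first position where any marker starts
--     for i in range(len(lower)):
--         for m in _MARKERS:
--             if lower.startswith(m, i):
--                 return i, m
--     return None
--
--
-- def _split_segment_on_uncertainty(segment):
--     hit = _find_marker(segment.lower())
--     if hit is None:
--         return [segment.strip()]
--     i, m = hit
--     before = segment[:i].strip(" ,;.")
--     rest = segment[i + len(m):].strip(" ,;.")
--     rest_lower = rest.lower()
--     for filler in ("how much", "how many"):
--         if rest_lower.startswith(filler):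
--             rest = rest[len(filler):].strip(" ,;.")
--             break
--     return [p for p in (before, rest) if p]
-- ===== Notes on version B (the rewrite author's own statement) =====
-- stated objective: simpler
-- what changed: A runs find() once per marker and tracks the minimum index; B does a single left-to-right scan for the first position where any marker starts, and then slices the marker off directly instead of stripping, re-checking startswith and re-stripping as A does.
import Mathlib
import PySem

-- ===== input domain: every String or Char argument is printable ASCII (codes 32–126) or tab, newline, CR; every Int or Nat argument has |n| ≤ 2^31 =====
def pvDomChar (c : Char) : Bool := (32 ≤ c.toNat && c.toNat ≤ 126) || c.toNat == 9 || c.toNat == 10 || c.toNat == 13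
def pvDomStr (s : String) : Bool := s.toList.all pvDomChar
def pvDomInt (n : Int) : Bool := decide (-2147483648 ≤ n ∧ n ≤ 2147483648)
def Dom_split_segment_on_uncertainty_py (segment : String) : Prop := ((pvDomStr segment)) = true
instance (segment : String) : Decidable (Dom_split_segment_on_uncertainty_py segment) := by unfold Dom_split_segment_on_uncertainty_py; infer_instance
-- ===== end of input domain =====

-- B replaces A's four whole-string find() scans with min-tracking by one left-to-right scan for the
-- first position where any marker starts, and slices the matched marker off directly instead of
-- A's redundant strip/startswith/re-strip sequence (objective: simpler).

-- ===== PORT A =====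

-- UNCERTAINTY_MARKERS = {"not sure", "maybe", "how much", "no idea"}; no two markers can match at
-- the same index, so the set's iteration order never affects the result.
def pvMarkers : List (List Char) :=
  [['n','o','t',' ','s','u','r','e'], ['m','a','y','b','e'],
   ['h','o','w',' ','m','u','c','h'], ['n','o',' ','i','d','e','a']]

-- the strip sets " ,;." and " ,;. " and the fillers "how much" / "how many", as char lists
def pvStrip4 : List Char := [' ', ',', ';', '.']
def pvStrip5 : List Char := [' ', ',', ';', '.', ' ']
def pvFillMuch : List Char := ['h','o','w',' ','m','u','c','h']
def pvFillMany : List Char := ['h','o','w',' ','m','a','n','y']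

-- one iteration of A's 'for marker in UNCERTAINTY_MARKERS' loop body
def pvStepA (lower : List Char) (acc : Option Int × Option (List Char)) (marker : List Char) :
    Option Int × Option (List Char) :=
  let idx := PySem.Chars.find lower marker
  if idx != -1 && acc.1.all (fun e => decide (idx < e)) then (some idx, some marker) else acc

def split_segment_on_uncertainty_py (segment : String) : List String :=
  let cs := segment.toList
  let lower := PySem.Chars.lower cs
  let st := pvMarkers.foldl (pvStepA lower) (none, none)
  match st with
  | (none, _) => [String.ofList (PySem.Chars.strip cs)]
  | (some earliest, matched) =>
    let before := PySem.Chars.stripChars (PySem.List.slice cs none (some earliest)) pvStrip4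
    let after := PySem.Chars.stripChars (PySem.List.slice cs (some earliest) none) pvStrip5
    let after :=
      if after ≠ [] then
        match matched with
        | none => after
        | some marker =>
          let afterLower := PySem.Chars.lower after
          if PySem.Chars.startswith afterLower marker then
            let a2 := PySem.Chars.stripChars
                (PySem.List.slice after (some (marker.length : Int)) none) pvStrip4
            let a2Lower := PySem.Chars.lower a2
            -- for filler in ("how much", "how many"): … break
            if PySem.Chars.startswith a2Lower pvFillMuch then
              PySem.Chars.stripChars
                (PySem.List.slice a2 (some ((pvFillMuch.length : Nat) : Int)) none) pvStrip4
            else if PySem.Chars.startswith a2Lower pvFillMany then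
              PySem.Chars.stripChars
                (PySem.List.slice a2 (some ((pvFillMany.length : Nat) : Int)) none) pvStrip4
            else a2
          else after
      else after
    (if before ≠ [] then [String.ofList before] else []) ++ (if after ≠ [] then [String.ofList after] else [])

-- ===== PORT B =====

-- _find_marker: scan positions left to right, return the first (i, marker) hit
def pvScan : List Char → Nat → Option (Nat × List Char)
  | [], _ => none
  | c :: t, i =>
    match pvMarkers.find? (fun m => PySem.Chars.startswith (c :: t) m) with
    | some m => some (i, m)
    | none => pvScan t (i + 1)

def split_segment_on_uncertainty_py_alt (segment : String) : List String :=
  let cs := segment.toList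
  match pvScan (PySem.Chars.lower cs) 0 with
  | none => [String.ofList (PySem.Chars.strip cs)]
  | some (i, m) =>
    let before := PySem.Chars.stripChars (cs.take i) pvStrip4
    let rest := PySem.Chars.stripChars (cs.drop (i + m.length)) pvStrip4
    let restLower := PySem.Chars.lower rest
    let rest :=
      if PySem.Chars.startswith restLower pvFillMuch then
        PySem.Chars.stripChars (rest.drop pvFillMuch.length) pvStrip4
      else if PySem.Chars.startswith restLower pvFillMany then
        PySem.Chars.stripChars (rest.drop pvFillMany.length) pvStrip4
      else rest
    ([before, rest].filter (· ≠ [])).map String.ofList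

-- ===== PRECONDITION & SPEC =====
def Spec_split_segment_on_uncertainty_py (segment : String) (out : List String) : Prop := out = split_segment_on_uncertainty_py_alt segment
instance (segment : String) (out : List String) : Decidable (Spec_split_segment_on_uncertainty_py segment out) := by unfold Spec_split_segment_on_uncertainty_py; infer_instance

-- ===== CLAIM (what is proved, stated in full; the proofs are below) =====
def Claim_equal_split_segment_on_uncertainty_py : Prop := ∀ (segment : String), Dom_split_segment_on_uncertainty_py segment → Spec_split_segment_on_uncertainty_py segment (split_segment_on_uncertainty_py segment)

-- ===== LEMMAS AND PROOFS =====

-- The strip set of " ,;. " and of " ,;." test the same characters.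
theorem pvStripSet_eq : (fun c => pvStrip5.contains c) = (fun c => pvStrip4.contains c) := by
  funext c
  by_cases h : c = ' ' <;> simp [pvStrip4, pvStrip5, List.contains_eq_mem, h]

theorem pvStripChars_eq (x : List Char) :
    PySem.Chars.stripChars x pvStrip5 = PySem.Chars.stripChars x pvStrip4 := by
  unfold PySem.Chars.stripChars
  rw [pvStripSet_eq]

-- membership in the strip set, concretely
theorem pvMemStrip (c : Char) : (pvStrip4.contains c = true) ↔ (c = ' ' ∨ c = ',' ∨ c = ';' ∨ c = '.') := by
  simp [pvStrip4, List.contains_eq_mem]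

-- a character whose lowercase is a marker's first/last letter is never strippable
theorem pvNotStrip_of_lower (c : Char) (h : PySem.Chars.lowerChar c = 'n' ∨ PySem.Chars.lowerChar c = 'm' ∨
    PySem.Chars.lowerChar c = 'h' ∨ PySem.Chars.lowerChar c = 'e' ∨ PySem.Chars.lowerChar c = 'a') :
    pvStrip4.contains c = false := by
  cases hc : (pvStrip4.contains c) with
  | false => rfl
  | true =>
    exfalso
    rcases (pvMemStrip c).1 hc with rfl | rfl | rfl | rfl <;> revert h <;> decide

-- no marker is a proper prefix of another
theorem pvMarkers_antichain (m m' : List Char) (hm : m ∈ pvMarkers) (hm' : m' ∈ pvMarkers)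
    (h : m <+: m') : m = m' := by
  simp only [pvMarkers, List.mem_cons, List.not_mem_nil, or_false] at hm hm'
  rcases hm with rfl | rfl | rfl | rfl <;> rcases hm' with rfl | rfl | rfl | rfl <;>
    first | rfl | (exfalso; revert h; decide)

-- ---- characterisation of B's scan ----

theorem pvMarkers_ne_nil (m : List Char) (hm : m ∈ pvMarkers) : m ≠ [] := by
  simp only [pvMarkers, List.mem_cons, List.not_mem_nil, or_false] at hm
  rcases hm with rfl | rfl | rfl | rfl <;> simp

theorem pvScan_none (l : List Char) (i : Nat) (h : pvScan l i = none) :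
    ∀ j, ∀ m ∈ pvMarkers, ¬ m <+: l.drop j := by
  induction l generalizing i with
  | nil =>
    intro j m hm hp
    simp at hp
    exact pvMarkers_ne_nil m hm hp
  | cons c t ih =>
    rw [pvScan] at h
    cases hf : pvMarkers.find? (fun m => PySem.Chars.startswith (c :: t) m) with
    | some m => rw [hf] at h; simp at h
    | none =>
      rw [hf] at h
      intro j m hm hp
      match j with
      | 0 =>
        have := List.find?_eq_none.mp hf m hm
        simp only [List.drop_zero] at hp
        exact this ((PySem.Chars.startswith_iff _ _).mpr hp)
      | j' + 1 => exact ih (i + 1) h j' m hm (by simpa using hp)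

theorem pvScan_some (l : List Char) (i p : Nat) (m : List Char) (h : pvScan l i = some (p, m)) :
    i ≤ p ∧ m ∈ pvMarkers ∧ m <+: l.drop (p - i) ∧
      ∀ j < p - i, ∀ m' ∈ pvMarkers, ¬ m' <+: l.drop j := by
  induction l generalizing i with
  | nil => simp [pvScan] at h
  | cons c t ih =>
    rw [pvScan] at h
    cases hf : pvMarkers.find? (fun m => PySem.Chars.startswith (c :: t) m) with
    | some m0 =>
      rw [hf] at h
      simp at h
      obtain ⟨rfl, rfl⟩ := h
      refine ⟨le_refl _, List.mem_of_find?_eq_some hf, ?_, by omega⟩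
      have := List.find?_some hf
      simpa using (PySem.Chars.startswith_iff _ _).mp this
    | none =>
      rw [hf] at h
      obtain ⟨h1, h2, h3, h4⟩ := ih (i + 1) h
      refine ⟨by omega, h2, ?_, ?_⟩
      · have : p - i = (p - (i+1)) + 1 := by omega
        rw [this]; simpa using h3
      · intro j hj m' hm' hp
        match j with
        | 0 =>
          have := List.find?_eq_none.mp hf m' hm'
          simp only [List.drop_zero] at hp
          exact this ((PySem.Chars.startswith_iff _ _).mpr hp)
        | j' + 1 => exact h4 j' (by omega) m' hm' (by simpa using hp)

theorem pvScan_isSome (l : List Char) (i j : Nat) (m : List Char) (hm : m ∈ pvMarkers)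
    (h : m <+: l.drop j) : pvScan l i ≠ none := by
  intro hn
  exact pvScan_none l i hn j m hm h

-- ---- characterisation of A's fold ----

theorem pvFoldA_none (l : List Char) (ms : List (List Char)) :
    (ms.foldl (pvStepA l) (none, none)).1 = none →
      ms.foldl (pvStepA l) (none, none) = (none, none) ∧
        ∀ m ∈ ms, PySem.Chars.find l m = -1 := by
  induction ms using List.reverseRecOn with
  | nil => simp
  | append_singleton ms m ih =>
    rw [List.foldl_append]
    intro h1
    simp only [List.foldl_cons, List.foldl_nil] at h1 ⊢
    rw [pvStepA] at h1 ⊢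
    split at h1
    · simp at h1
    · rename_i hcond
      obtain ⟨hr, hall⟩ := ih h1
      rw [hr] at hcond h1 ⊢
      rw [if_neg hcond]
      refine ⟨rfl, ?_⟩
      intro m' hm'
      rcases List.mem_append.mp hm' with h | h
      · exact hall m' h
      · simp only [List.mem_singleton] at h; subst h
        simp only [Option.all_none, Bool.and_true, bne_iff_ne, ne_eq, not_not] at hcond
        exact hcond

theorem pvFoldA_some (l : List Char) (ms : List (List Char)) (e : Int)
    (h : (ms.foldl (pvStepA l) (none, none)).1 = some e) :
    ∃ m ∈ ms, (ms.foldl (pvStepA l) (none, none)).2 = some m ∧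
      PySem.Chars.find l m = e ∧ 0 ≤ e ∧
      ∀ m' ∈ ms, PySem.Chars.find l m' = -1 ∨ e ≤ PySem.Chars.find l m' := by
  induction ms using List.reverseRecOn generalizing e with
  | nil => simp at h
  | append_singleton ms m ih =>
    rw [List.foldl_append] at h ⊢
    simp only [List.foldl_cons, List.foldl_nil] at h ⊢
    rw [pvStepA] at h ⊢
    split at h <;> rename_i hcond <;>
      [skip; rw [if_neg hcond]] <;> [rw [if_pos hcond]; skip]
    · simp only [Option.some.injEq] at h
      subst h
      simp only [Bool.and_eq_true, bne_iff_ne, ne_eq] at hcond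
      obtain ⟨hne, hall⟩ := hcond
      have h0 : (0:Int) ≤ PySem.Chars.find l m := by
        have := PySem.Chars.neg_one_le_find l m
        omega
      refine ⟨m, by simp, rfl, rfl, h0, ?_⟩
      intro m' hm'
      rcases List.mem_append.mp hm' with hh | hh
      · cases hacc : (ms.foldl (pvStepA l) (none, none)).1 with
        | none =>
          exact Or.inl ((pvFoldA_none l ms hacc).2 m' hh)
        | some e1 =>
          rw [hacc] at hall
          simp only [Option.all_some, decide_eq_true_eq] at hall
          obtain ⟨m0, hm0, hr2, hf0, he0, hmin⟩ := ih e1 hacc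
          rcases hmin m' hh with h1 | h1
          · exact Or.inl h1
          · exact Or.inr (le_of_lt (lt_of_lt_of_le hall h1))
      · simp only [List.mem_singleton] at hh; subst hh
        exact Or.inr (le_refl _)
    · obtain ⟨m0, hm0, hr2, hf0, he0, hmin⟩ := ih e h
      refine ⟨m0, by simp [hm0], hr2, hf0, he0, ?_⟩
      intro m' hm'
      rcases List.mem_append.mp hm' with hh | hh
      · exact hmin m' hh
      · simp only [List.mem_singleton] at hh; subst hh
        rw [h] at hcond
        simp only [Bool.and_eq_true, bne_iff_ne, ne_eq, Option.all_some, decide_eq_true_eq,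
          not_and, not_lt] at hcond
        by_cases hne : PySem.Chars.find l m' = -1
        · exact Or.inl hne
        · exact Or.inr (hcond (by simpa using hne))

-- ---- stripping around a marker occurrence ----

theorem pvStrip_append_strippable (u z : List Char)
    (hz : ∀ c ∈ z, pvStrip4.contains c = true) :
    PySem.Chars.stripChars (u ++ z) pvStrip4 = PySem.Chars.stripChars u pvStrip4 := by
  unfold PySem.Chars.stripChars
  simp only []
  set p : Char → Bool := fun c => pvStrip4.contains c with hp
  rw [List.dropWhile_append]
  split <;> rename_i hc
  · rw [List.isEmpty_iff] at hc
    rw [hc]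
    rw [List.dropWhile_eq_nil_iff.mpr hz]
  · rw [List.reverse_append, List.dropWhile_append]
    rw [List.dropWhile_eq_nil_iff.mpr (by intro c hcz; exact hz c (by simpa using hcz))]
    simp

theorem pvStrip_marker_core (x m : List Char) (hm : m ≠ [])
    (hhead : ∀ c, PySem.Chars.lowerChar c = m.headI → pvStrip4.contains c = false)
    (hlast : ∀ c, PySem.Chars.lowerChar c = m.getLastI → pvStrip4.contains c = false)
    (hpre : m <+: PySem.Chars.lower x) :
    (PySem.Chars.stripChars x pvStrip4 ≠ [] ∧
     m <+: PySem.Chars.lower (PySem.Chars.stripChars x pvStrip4) ∧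
     PySem.Chars.stripChars ((PySem.Chars.stripChars x pvStrip4).drop m.length) pvStrip4 =
       PySem.Chars.stripChars (x.drop m.length) pvStrip4) := by
  set p : Char → Bool := fun c => pvStrip4.contains c with hp
  have hxlen : m.length ≤ x.length := by
    have := hpre.length_le
    simpa [PySem.Chars.lower] using this
  have hmlen : 1 ≤ m.length := by
    cases m with | nil => simp at hm | cons a t => simp
  obtain ⟨c, t, rfl⟩ : ∃ c t, x = c :: t := by
    cases x with
    | nil => exact absurd (List.eq_nil_of_length_eq_zero (by simpa using hxlen)) hm
    | cons c t => exact ⟨c, t, rfl⟩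
  have hheadc : PySem.Chars.lowerChar c = m.headI := by
    cases m with
    | nil => simp at hm
    | cons mh mt =>
      have := (List.cons_prefix_cons.mp (by simpa [PySem.Chars.lower] using hpre)).1
      simp [this]
  have hpc : p c = false := hhead c hheadc
  have hls : List.dropWhile p (c :: t) = c :: t := List.dropWhile_cons_of_neg (by simp [hpc])
  have hstrip : PySem.Chars.stripChars (c :: t) pvStrip4 =
      (List.dropWhile p (c :: t).reverse).reverse := by
    unfold PySem.Chars.stripChars
    simp only []
    rw [hls]
  set y := (List.dropWhile p (c :: t).reverse).reverse with hy
  set z := (List.takeWhile p (c :: t).reverse).reverse with hzdef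
  have hsplit : c :: t = y ++ z := by
    rw [hy, hzdef, ← List.reverse_append, List.takeWhile_append_dropWhile, List.reverse_reverse]
  have hzall : ∀ d ∈ z, p d = true := by
    intro d hd
    exact List.mem_takeWhile_imp (by simpa [hzdef] using hd)
  have hklen : m.length ≤ y.length := by
    by_contra hlt
    push Not at hlt
    have hzlen : (c :: t).length = y.length + z.length := by
      rw [hsplit]; simp
    have hidx : m.length - 1 < (c :: t).length := by omega
    have hiz : m.length - 1 - y.length < z.length := by omega
    have hgz : (c :: t)[m.length - 1]? = some (z[m.length - 1 - y.length]'hiz) := by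
      rw [hsplit, List.getElem?_append_right (by omega)]
      exact List.getElem?_eq_getElem hiz
    have hgc : (c :: t)[m.length - 1]'hidx = z[m.length - 1 - y.length]'hiz := by
      have h0 := List.getElem?_eq_getElem hidx
      rw [h0] at hgz
      exact Option.some.inj hgz
    have hlow : PySem.Chars.lowerChar ((c :: t)[m.length - 1]'hidx) = m.getLastI := by
      have h1 : m[m.length - 1]'(by omega) = (PySem.Chars.lower (c :: t))[m.length - 1]'(by
          simpa [PySem.Chars.lower] using hidx) := hpre.getElem (by omega)
      have h2 : m.getLastI = m[m.length - 1]'(by omega) := by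
        rw [List.getLastI_eq_getLast?_getD, List.getLast?_eq_getElem?]
        simp [List.getElem?_eq_getElem (by omega : m.length - 1 < m.length)]
      rw [h2, h1]
      simp only [PySem.Chars.lower]
      rw [List.getElem_map]
    have hl1 := hlast _ hlow
    rw [hgc] at hl1
    exact absurd (hzall _ (List.getElem_mem hiz))
      (by simp [hp, List.contains_eq_mem] at hl1 ⊢; exact hl1)
  have hyx : y = (c :: t).take y.length := by
    have : y <+: (c :: t) := ⟨z, hsplit.symm⟩
    exact List.prefix_iff_eq_take.mp this
  refine ⟨?_, ?_, ?_⟩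
  · intro hnil
    rw [hstrip] at hnil
    have h0 : y.length = 0 := by rw [hnil]; rfl
    omega
  · rw [hstrip, hyx]
    unfold PySem.Chars.lower
    rw [List.map_take]
    rw [List.prefix_take_iff]
    exact ⟨hpre, by simpa using hklen⟩
  · rw [hstrip]
    have hdx : (c :: t).drop m.length = y.drop m.length ++ z := by
      rw [hsplit, List.drop_append_of_le_length hklen]
    rw [hdx]
    exact (pvStrip_append_strippable _ z hzall).symm

theorem pvStrip_marker (x m : List Char) (hm : m ∈ pvMarkers)
    (hpre : m <+: PySem.Chars.lower x) :
    (PySem.Chars.stripChars x pvStrip4 ≠ [] ∧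
     m <+: PySem.Chars.lower (PySem.Chars.stripChars x pvStrip4) ∧
     PySem.Chars.stripChars ((PySem.Chars.stripChars x pvStrip4).drop m.length) pvStrip4 =
       PySem.Chars.stripChars (x.drop m.length) pvStrip4) := by
  simp only [pvMarkers, List.mem_cons, List.not_mem_nil, or_false] at hm
  rcases hm with rfl | rfl | rfl | rfl
  · exact pvStrip_marker_core x _ (by simp)
      (fun c h => pvNotStrip_of_lower c (Or.inl h))
      (fun c h => pvNotStrip_of_lower c (Or.inr (Or.inr (Or.inr (Or.inl h))))) hpre
  · exact pvStrip_marker_core x _ (by simp)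
      (fun c h => pvNotStrip_of_lower c (Or.inr (Or.inl h)))
      (fun c h => pvNotStrip_of_lower c (Or.inr (Or.inr (Or.inr (Or.inl h))))) hpre
  · exact pvStrip_marker_core x _ (by simp)
      (fun c h => pvNotStrip_of_lower c (Or.inr (Or.inr (Or.inl h))))
      (fun c h => pvNotStrip_of_lower c (Or.inr (Or.inr (Or.inl h)))) hpre
  · exact pvStrip_marker_core x _ (by simp)
      (fun c h => pvNotStrip_of_lower c (Or.inl h))
      (fun c h => pvNotStrip_of_lower c (Or.inr (Or.inr (Or.inr (Or.inr h))))) hpre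

theorem pvInfix_of_prefix_drop {m l : List Char} {p : Nat} (h : m <+: l.drop p) : m <:+: l := by
  obtain ⟨r, hr⟩ := h
  exact ⟨l.take p, r, by rw [List.append_assoc, hr, List.take_append_drop]⟩

theorem pvAssemble (b a : List Char) :
    (if b ≠ [] then [String.ofList b] else []) ++ (if a ≠ [] then [String.ofList a] else []) =
    ([b, a].filter (· ≠ [])).map String.ofList := by
  by_cases hb : b = [] <;> by_cases ha : a = [] <;> simp [hb, ha]

-- ===== VERDICT (by name: the statement is the Claim_ definition above) =====
theorem split_segment_on_uncertainty_py_spec : Claim_equal_split_segment_on_uncertainty_py := by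
  intro segment _
  unfold Spec_split_segment_on_uncertainty_py
  unfold split_segment_on_uncertainty_py split_segment_on_uncertainty_py_alt
  simp only []
  set cs := segment.toList with hcs
  set L := PySem.Chars.lower cs with hL
  cases hst : pvMarkers.foldl (pvStepA L) (none, none) with
  | mk e? mm =>
  cases e? with
  | none =>
    have hall := (pvFoldA_none L pvMarkers (by rw [hst])).2
    cases hscan : pvScan L 0 with
    | none => dsimp only
    | some pm =>
      exfalso
      obtain ⟨p, m⟩ := pm
      obtain ⟨-, hm, hpre, -⟩ := pvScan_some L 0 p m hscan
      exact ((PySem.Chars.find_ne_neg_one_iff _ _).mpr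
        (pvInfix_of_prefix_drop hpre)) (hall m hm)
  | some e =>
    obtain ⟨m, hm, hmm, hfind, he0, hmin⟩ := pvFoldA_some L pvMarkers e (by rw [hst])
    rw [hst] at hmm
    simp only at hmm
    subst hmm
    set q := e.toNat with hq
    have he0' : 0 ≤ PySem.Chars.find L m := by rw [hfind]; exact he0
    obtain ⟨hpre0, hminA⟩ := PySem.Chars.find_spec he0'
    rw [hfind] at hpre0 hminA
    cases hscan : pvScan L 0 with
    | none => exact absurd hscan (pvScan_isSome L 0 q m hm hpre0)
    | some pm =>
      obtain ⟨p2, m2⟩ := pm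
      obtain ⟨-, hm2, hpre2, hmin2⟩ := pvScan_some L 0 p2 m2 hscan
      simp only [Nat.sub_zero] at hpre2 hmin2
      have hp2q : p2 = q := by
        rcases lt_trichotomy p2 q with h | h | h
        · exfalso
          have hnn : 0 ≤ PySem.Chars.find L m2 :=
            (PySem.Chars.find_nonneg_iff _ _).mpr (pvInfix_of_prefix_drop hpre2)
          have hfs2 := PySem.Chars.find_spec hnn
          have hle : (PySem.Chars.find L m2).toNat ≤ p2 := by
            by_contra hgt
            push Not at hgt
            exact hfs2.2 p2 hgt hpre2
          have hge : e ≤ PySem.Chars.find L m2 := by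
            rcases hmin m2 hm2 with hbad | hok
            · rw [hbad] at hnn; omega
            · exact hok
          have := Int.toNat_le_toNat hge
          omega
        · exact h
        · exact absurd hpre0 (hmin2 q h m hm)
      subst hp2q
      have hmeq : m2 = m := by
        rcases List.prefix_or_prefix_of_prefix hpre2 hpre0 with h | h
        · exact pvMarkers_antichain _ _ hm2 hm h
        · exact (pvMarkers_antichain _ _ hm hm2 h).symm
      subst hmeq
      -- both sides now name the same position p2 = e.toNat and the same marker m2
      dsimp only
      rw [PySem.List.slice_to cs he0, PySem.List.slice_from cs he0, ← hq, pvStripChars_eq]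
      have hpreD : m2 <+: PySem.Chars.lower (cs.drop q) := by
        unfold PySem.Chars.lower
        rw [List.map_drop]
        exact hpre0
      obtain ⟨hne, hpr, heq⟩ := pvStrip_marker (cs.drop q) m2 hm2 hpreD
      rw [if_pos hne]
      rw [if_pos ((PySem.Chars.startswith_iff _ _).mpr hpr)]
      rw [PySem.List.slice_from _ (by positivity : (0:Int) ≤ (m2.length : Int)),
          Int.toNat_natCast]
      rw [heq, List.drop_drop]
      rw [PySem.List.slice_from _ (by positivity : (0:Int) ≤ ((pvFillMuch.length : Nat) : Int)),
          Int.toNat_natCast]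
      rw [PySem.List.slice_from _ (by positivity : (0:Int) ≤ ((pvFillMany.length : Nat) : Int)),
          Int.toNat_natCast]
      rw [pvAssemble]
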